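-- pv_equiv track=rewrite | github.com/sasha-tsepilova/skyscraper | skyscrapers.py | check_uniqueness_in_rows
-- ===== SOURCE A (Python) =====
-- def check_uniqueness_in_rows(board: list):
--     """
--     Check buildings of unique height in each row.
--
--     Return True if buildings in a row have unique length, False otherwise.
--
--     >>> check_uniqueness_in_rows(['***21**', '412453*', '423145*', '*543215', '*35214*', '*41532*'\
-- , '*2*1***'])
--     True
--     >>> check_uniqueness_in_rows(['***21**', '452453*', '423145*', '*543215', '*35214*', '*41532*'\
-- , '*2*1***'])
--     False
--     >>> check_uniqueness_in_rows(['***21**', '412453*', '423145*', '*553215', '*35214*', '*41532*'\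
-- , '*2*1***'])
--     False
--     """
--     for index, row in enumerate(board):
--
--         if index not in (0, len(board) - 1):
--             without_hints = row[1:-1]
--             row_single = set(without_hints)
--
--             if len(without_hints) != len(row_single):
--                 return False
--
--     return True
-- ===== SOURCE B (Python) =====
-- def check_uniqueness_in_rows(board: list):
--     """Sort each middle row's interior, then scan adjacent pairs for a duplicate."""
--     for i in range(1, len(board) - 1):
--         chars = sorted(board[i][1:-1])
--         for a, b in zip(chars, chars[1:]):
--             if a == b:
--                 return False
--     return True
-- ===== Notes on version B (the rewrite author's own statement) =====
-- stated objective: alternative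
-- what changed: B replaces A's enumerate-all-rows-and-compare-set-size check with an index loop over the middle rows that sorts each row's interior and scans adjacent pairs for an equal neighbour.
import Mathlib
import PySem

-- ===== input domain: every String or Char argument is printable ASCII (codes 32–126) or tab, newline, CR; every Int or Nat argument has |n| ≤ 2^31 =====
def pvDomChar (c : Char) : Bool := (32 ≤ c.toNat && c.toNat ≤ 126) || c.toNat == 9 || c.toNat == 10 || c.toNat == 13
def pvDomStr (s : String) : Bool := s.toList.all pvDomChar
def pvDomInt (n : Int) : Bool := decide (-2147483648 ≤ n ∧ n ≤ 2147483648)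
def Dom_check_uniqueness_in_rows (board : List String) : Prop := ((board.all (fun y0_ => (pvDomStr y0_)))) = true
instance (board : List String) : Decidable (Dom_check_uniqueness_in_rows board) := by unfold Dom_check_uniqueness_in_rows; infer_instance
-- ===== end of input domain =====

-- B sorts each middle row's interior and scans adjacent pairs instead of comparing a set's size; objective: alternative duplicate-detection strategy, no speed claim.

-- ===== PORT A =====
-- the 'for index, row in enumerate(board)' loop with its early 'return False'
def pvRowsA (n : Int) : List (Int × String) → Bool
  | [] => true
  | (index, row) :: rest =>
    if index = 0 ∨ index = n - 1 then pvRowsA n rest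
    else
      let without_hints := PySem.List.slice row.toList (some 1) (some (-1))
      let row_single := PySem.Set.ofList without_hints
      if without_hints.length ≠ row_single.length then false
      else pvRowsA n rest

def check_uniqueness_in_rows (board : List String) : Bool :=
  pvRowsA (board.length : Int) (PySem.List.enumerate board 0)

-- ===== PORT B =====
-- 'for a, b in zip(chars, chars[1:]): if a == b: return False'
def pvAdjDup : List Char → Bool
  | a :: b :: rest => if a = b then true else pvAdjDup (b :: rest)
  | _ => false

def check_uniqueness_in_rows_alt (board : List String) : Bool :=
  (PySem.List.pyRange 1 ((board.length : Int) - 1) 1).all (fun i =>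
    !pvAdjDup (PySem.List.sorted
      (PySem.List.slice (PySem.List.pyGetD board i "").toList (some 1) (some (-1)))
      (fun c => c) false))

-- ===== PRECONDITION & SPEC =====
def Spec_check_uniqueness_in_rows (board : List String) (out : Bool) : Prop := out = check_uniqueness_in_rows_alt board
instance (board : List String) (out : Bool) : Decidable (Spec_check_uniqueness_in_rows board out) := by unfold Spec_check_uniqueness_in_rows; infer_instance

-- ===== CLAIM (what is proved, stated in full; the proofs are below) =====
def Claim_equal_check_uniqueness_in_rows : Prop := ∀ (board : List String), Dom_check_uniqueness_in_rows board → Spec_check_uniqueness_in_rows board (check_uniqueness_in_rows board)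

-- ===== LEMMAS AND PROOFS =====

-- the per-row test A performs, as a single Bool
def pvRowA (n : Int) (p : Int × String) : Bool :=
  if p.1 = 0 ∨ p.1 = n - 1 then true
  else
    let wh := PySem.List.slice p.2.toList (some 1) (some (-1))
    !decide (wh.length ≠ (PySem.Set.ofList wh).length)

lemma pvRowsA_eq_all (n : Int) (es : List (Int × String)) :
    pvRowsA n es = es.all (pvRowA n) := by
  induction es with
  | nil => rfl
  | cons p rest ih =>
    obtain ⟨index, row⟩ := p
    simp only [pvRowsA, pvRowA, List.all_cons]
    split_ifs with h1 h2 <;> simp_all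

-- on a ≤-sorted list, no adjacent duplicate means no duplicate at all
lemma pvAdjDup_false_iff_nodup (s : List Char) (hs : s.Pairwise (fun a b => a ≤ b)) :
    pvAdjDup s = false ↔ s.Nodup := by
  induction s with
  | nil => simp [pvAdjDup]
  | cons a t ih =>
    cases t with
    | nil => simp [pvAdjDup]
    | cons b r =>
      rw [List.pairwise_cons] at hs
      obtain ⟨ha, ht⟩ := hs
      by_cases hab : a = b
      · subst hab
        simp [pvAdjDup]
      · have h1 : pvAdjDup (a :: b :: r) = pvAdjDup (b :: r) := by
          simp [pvAdjDup, hab]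
        rw [h1, ih ht]
        have hap : a ∉ b :: r := by
          intro hm
          rcases List.mem_cons.mp hm with h | h
          · exact hab h
          · have hab' : a < b := lt_of_le_of_ne (ha b (by simp)) hab
            have hbx : b ≤ a := (List.pairwise_cons.mp ht).1 a h
            exact absurd (lt_of_lt_of_le hab' hbx) (lt_irrefl a)
        constructor
        · intro hnd; exact List.nodup_cons.mpr ⟨hap, hnd⟩
        · intro hnd; exact (List.nodup_cons.mp hnd).2

lemma discard_length_lt {s : List Char} {x : Char} (hx : x ∈ s) :
    (PySem.Set.discard s x).length < s.length := by
  simp only [PySem.Set.discard]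
  refine List.length_filter_lt_length_iff_exists.mpr ⟨x, hx, by simp⟩

lemma discard_of_not_mem {s : List Char} {x : Char} (hx : x ∉ s) :
    PySem.Set.discard s x = s := by
  simp only [PySem.Set.discard]
  refine List.filter_eq_self.mpr ?_
  intro a ha
  have hne : a ≠ x := fun h => hx (h ▸ ha)
  simp [hne]

lemma length_ofList_lt_of_not_nodup {l : List Char} (h : ¬ l.Nodup) :
    (PySem.Set.ofList l).length < l.length := by
  induction l with
  | nil => simp at h
  | cons x xs ih =>
    rw [PySem.Set.ofList_cons]
    by_cases hx : x ∈ xs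
    · have hx' : x ∈ PySem.Set.ofList xs := (PySem.Set.mem_ofList xs x).mpr hx
      have h1 := discard_length_lt hx'
      have h2 := PySem.Set.length_ofList_le (xs := xs)
      simp only [List.length_cons]
      omega
    · have hxs : ¬ xs.Nodup := by
        intro hnd; exact h (List.nodup_cons.mpr ⟨hx, hnd⟩)
      have hx' : x ∉ PySem.Set.ofList xs := fun hm => hx ((PySem.Set.mem_ofList xs x).mp hm)
      rw [discard_of_not_mem hx']
      have := ih hxs
      simp only [List.length_cons]
      omega

-- the per-row test B performs agrees with A's
lemma row_tests_agree (row : String) :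
    (!pvAdjDup (PySem.List.sorted
      (PySem.List.slice row.toList (some 1) (some (-1))) (fun c => c) false))
    = (!decide ((PySem.List.slice row.toList (some 1) (some (-1))).length ≠
        (PySem.Set.ofList (PySem.List.slice row.toList (some 1) (some (-1)))).length)) := by
  set wh := PySem.List.slice row.toList (some 1) (some (-1)) with hwh
  have hperm : (PySem.List.sorted wh (fun c => c) false).Perm wh := PySem.List.sorted_perm wh _ _
  have hpw : (PySem.List.sorted wh (fun c => c) false).Pairwise (fun a b => a ≤ b) :=
    PySem.List.sorted_pairwise wh _
  have h1 : pvAdjDup (PySem.List.sorted wh (fun c => c) false) = false ↔ wh.Nodup := by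
    rw [pvAdjDup_false_iff_nodup _ hpw]
    exact hperm.nodup_iff
  cases hb : pvAdjDup (PySem.List.sorted wh (fun c => c) false) with
  | false =>
    have hnd := h1.mp hb
    rw [PySem.Set.ofList_eq_self_of_nodup wh hnd]
    simp
  | true =>
    have hnd : ¬ wh.Nodup := fun hn => by rw [h1.mpr hn] at hb; cases hb
    have hlt := length_ofList_lt_of_not_nodup hnd
    have hne : wh.length ≠ (PySem.Set.ofList wh).length := by omega
    simp [hne]

-- ===== VERDICT (by name: the statement is the Claim_ definition above) =====
theorem check_uniqueness_in_rows_spec : Claim_equal_check_uniqueness_in_rows := by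
  intro board _
  unfold Spec_check_uniqueness_in_rows check_uniqueness_in_rows check_uniqueness_in_rows_alt
  rw [pvRowsA_eq_all]
  rw [Bool.eq_iff_iff, List.all_eq_true, List.all_eq_true]
  constructor
  · intro hA i hi
    rw [PySem.List.mem_pyRange_one] at hi
    obtain ⟨h1, h2⟩ := hi
    have hlt : i.toNat < board.length := by omega
    have hget : PySem.List.pyGetD board i "" = board[i.toNat] := by
      rw [PySem.List.pyGetD_of_nonneg board "" (by omega)]
      rw [List.getD_eq_getElem _ _ hlt]
    have hmem : ((i : Int), board[i.toNat]) ∈ PySem.List.enumerate board 0 := by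
      rw [PySem.List.mem_enumerate_iff]
      exact ⟨i.toNat, hlt, by simp [Prod.ext_iff]; omega⟩
    have hrow := hA _ hmem
    unfold pvRowA at hrow
    rw [if_neg (by rintro (h | h) <;> omega)] at hrow
    rw [hget, row_tests_agree]
    exact hrow
  · intro hB p hp
    rw [PySem.List.mem_enumerate_iff] at hp
    obtain ⟨k, hk, rfl⟩ := hp
    unfold pvRowA
    by_cases hz : (0 : Int) + (k : Int) = 0 ∨ (0 : Int) + (k : Int) = (board.length : Int) - 1
    · rw [if_pos hz]
    · rw [if_neg hz]
      have hz' : ¬ ((k : Int) = 0 ∨ (k : Int) = (board.length : Int) - 1) := by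
        rintro (h | h) <;> exact hz (by omega)
      have hi : (0 : Int) + (k : Int) ∈ PySem.List.pyRange 1 ((board.length : Int) - 1) 1 := by
        rw [PySem.List.mem_pyRange_one]
        constructor <;> omega
      have hrow := hB _ hi
      have htn : ((0 : Int) + (k : Int)).toNat = k := by omega
      have hget : PySem.List.pyGetD board ((0 : Int) + (k : Int)) "" = board[k] := by
        rw [PySem.List.pyGetD_of_nonneg board "" (by omega), htn]
        rw [List.getD_eq_getElem _ _ hk]
      rw [hget, row_tests_agree] at hrow
      exact hrow
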